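-- pv_equiv track=rewrite | github.com/stolniceanudenisa/Public-key-cryptography | Lab/BasicRsa/main.py | specialized_eulers_totient
-- ===== SOURCE A (Python) =====
-- def specialized_eulers_totient(n: int) -> int:
--     # we know that n is composed of 2 primes p, q. As such the totient function of n
--     # is phi(n) = (p-1)(q-1)
--     p = 0
--     q = 0
--     for d in range(2, n):
--         if n % d == 0:
--             p = d
--             q = n // d
--     return (p - 1) * (q - 1)
-- ===== SOURCE B (Python) =====
-- def specialized_eulers_totient(n: int) -> int:
--     # n = p*q with primes p <= q: the smallest factor d satisfies d*d <= n,
--     # so trial division up to sqrt(n) suffices; (d-1)*(n//d-1) = (p-1)*(q-1).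
--     d = 2
--     while d * d <= n:
--         if n % d == 0:
--             return (d - 1) * (n // d - 1)
--         d += 1
--     return 1
-- ===== Notes on version B (the rewrite author's own statement) =====
-- stated objective: faster
-- what changed: Replace the full scan over range(2,n) that keeps the last divisor with trial division up to sqrt(n) that returns at the first (smallest) factor d, using (d-1)*(n//d-1) = (p-1)*(q-1).
import Mathlib
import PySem

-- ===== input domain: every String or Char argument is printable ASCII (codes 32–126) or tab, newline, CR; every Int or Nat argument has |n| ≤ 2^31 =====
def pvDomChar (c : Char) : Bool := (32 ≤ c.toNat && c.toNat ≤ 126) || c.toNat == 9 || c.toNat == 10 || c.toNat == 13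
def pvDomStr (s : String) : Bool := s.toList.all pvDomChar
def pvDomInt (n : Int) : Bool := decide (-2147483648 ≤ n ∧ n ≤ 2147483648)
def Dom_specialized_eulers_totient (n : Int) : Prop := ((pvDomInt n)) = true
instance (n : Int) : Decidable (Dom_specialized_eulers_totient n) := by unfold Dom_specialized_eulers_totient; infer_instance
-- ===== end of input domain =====

-- B replaces A's full scan over range(2,n) (keeping the last divisor) by trial division
-- up to sqrt(n) returning at the smallest factor; objective: faster (asymptotic).


-- ===== PORT A =====
def specialized_eulers_totient (n : Int) : Int :=
  let pq := (PySem.List.pyRange 2 n 1).foldl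
    (fun (pq : Int × Int) d =>
      if PySem.Int.mod n d == 0 then (d, PySem.Int.floordiv n d) else pq)
    ((0 : Int), (0 : Int))
  (pq.1 - 1) * (pq.2 - 1)

-- ===== PORT B =====
-- B's while loop: d = 2; while d*d <= n: if n % d == 0: return (d-1)*(n//d-1); d += 1; return 1
def pvAltLoop (n d : Int) : Int :=
  if _h : d * d ≤ n then
    if PySem.Int.mod n d == 0 then (d - 1) * (PySem.Int.floordiv n d - 1)
    else pvAltLoop n (d + 1)
  else 1
termination_by (n + 1 - d).toNat
decreasing_by
  rcases (by omega : d ≤ 0 ∨ 0 < d) with h0 | h1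
  · have := mul_self_nonneg d; omega
  · have : d ≤ d * d := by nlinarith
    omega

def specialized_eulers_totient_alt (n : Int) : Int := pvAltLoop n 2

-- ===== PRECONDITION & SPEC =====
def Spec_specialized_eulers_totient (n : Int) (out : Int) : Prop := out = specialized_eulers_totient_alt n
instance (n : Int) (out : Int) : Decidable (Spec_specialized_eulers_totient n out) := by unfold Spec_specialized_eulers_totient; infer_instance

-- ===== CLAIM (what is proved, stated in full; the proofs are below) =====
def Claim_equal_specialized_eulers_totient : Prop := ∀ (n : Int), Dom_specialized_eulers_totient n → Spec_specialized_eulers_totient n (specialized_eulers_totient n)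

-- ===== LEMMAS AND PROOFS =====

-- A's loop keeps g x for the LAST x of the range passing the test.
theorem pv_foldl_if_last {α β : Type} (c : α → Bool) (g : α → β) :
    ∀ (l : List α) (init : β),
      l.foldl (fun s x => if c x then g x else s) init
        = ((l.filter c).getLast?).elim init g := by
  intro l
  induction l using List.reverseRecOn with
  | nil => intro init; simp
  | append_singleton l a ih =>
    intro init
    rw [List.foldl_append, List.filter_append]
    by_cases h : c a
    · simp [h]
    · simp [h, ih]

-- in a strictly sorted list, an upper-bound member is the last element
theorem pv_getLast?_of_sorted_max :
    ∀ (L : List Int) (a : Int), L.Pairwise (· < ·) → a ∈ L →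
      (∀ x ∈ L, x ≤ a) → L.getLast? = some a := by
  intro L
  induction L with
  | nil => intro a _ ha; cases ha
  | cons b L ih =>
    intro a hp ha hub
    rcases L with _ | ⟨c, L'⟩
    · simp at ha ⊢; omega
    · have hp' := (List.pairwise_cons.mp hp).2
      have hblt := (List.pairwise_cons.mp hp).1
      have haL : a ∈ c :: L' := by
        rcases List.mem_cons.mp ha with rfl | h
        · exact absurd (hub c (by simp)) (by have := hblt c (by simp); omega)
        · exact h
      rw [List.getLast?_cons_cons]
      exact ih a hp' haL (fun x hx => hub x (List.mem_cons_of_mem _ hx))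

-- if n has no divisor in [2, n), A returns (0-1)*(0-1) = 1
theorem pv_A_one (n : Int) (hno : ∀ e, 2 ≤ e → e < n → ¬ e ∣ n) :
    specialized_eulers_totient n = 1 := by
  unfold specialized_eulers_totient
  rw [pv_foldl_if_last]
  have hfil : (PySem.List.pyRange 2 n 1).filter (fun d => PySem.Int.mod n d == 0) = [] := by
    rw [List.filter_eq_nil_iff]
    intro x hx
    have hm := (PySem.List.mem_pyRange_one).mp hx
    simp only [beq_iff_eq]
    intro hmod
    exact hno x hm.1 hm.2 ((PySem.Int.mod_eq_zero_iff_dvd n x).mp hmod)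
  rw [hfil]
  norm_num

-- if d is the smallest divisor ≥ 2 of n and d*d ≤ n, A's last-found pair is (n/d, d)
theorem pv_A_eq (n d : Int) (hd2 : 2 ≤ d) (hdvd : d ∣ n) (hsq : d * d ≤ n)
    (hmin : ∀ e, 2 ≤ e → e < d → ¬ e ∣ n) :
    specialized_eulers_totient n = (d - 1) * (PySem.Int.floordiv n d - 1) := by
  have hdpos : 0 < d := by omega
  obtain ⟨k, hk⟩ := hdvd
  have hkd : d ≤ k := by nlinarith
  have hk2 : 2 ≤ k := by omega
  have hkn : k < n := by nlinarith
  have hkdvd : k ∣ n := ⟨d, by linarith [hk, mul_comm d k]⟩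
  have hndk : n = d * k := hk
  unfold specialized_eulers_totient
  rw [pv_foldl_if_last]
  have hlast : ((PySem.List.pyRange 2 n 1).filter
      (fun e => PySem.Int.mod n e == 0)).getLast? = some k := by
    apply pv_getLast?_of_sorted_max
    · exact List.Pairwise.filter _ (PySem.List.pairwise_lt_pyRange_one 2 n)
    · rw [List.mem_filter]
      constructor
      · exact (PySem.List.mem_pyRange_one).mpr ⟨hk2, hkn⟩
      · simp only [beq_iff_eq]
        exact (PySem.Int.mod_eq_zero_iff_dvd n k).mpr hkdvd
    · intro x hx
      rw [List.mem_filter] at hx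
      have hmem := (PySem.List.mem_pyRange_one).mp hx.1
      have hxdvd : x ∣ n := (PySem.Int.mod_eq_zero_iff_dvd n x).mp (by simpa using hx.2)
      obtain ⟨m, hm⟩ := hxdvd
      have hxpos : 0 < x := by omega
      have hm2 : 2 ≤ m := by nlinarith
      have hmd : d ≤ m := by
        by_contra hlt
        exact hmin m hm2 (by omega) ⟨x, by linarith [hm, mul_comm x m]⟩
      -- x * d ≤ x * m = n, so x ≤ n / d = k
      nlinarith
  rw [hlast]
  have hfd : PySem.Int.floordiv n k = d := by
    rw [PySem.Int.floordiv_eq_ediv_of_pos (by omega)]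
    rw [hndk, Int.mul_ediv_cancel _ (by omega)]
  have hfk : PySem.Int.floordiv n d = k := by
    rw [PySem.Int.floordiv_eq_ediv_of_pos hdpos]
    rw [hndk, Int.mul_ediv_cancel_left _ (by omega)]
  simp only [Option.elim, hfd, hfk]
  ring

-- B's loop, started at d with no factor below d, computes A's value
theorem pv_loop_eq (n : Int) : ∀ d : Int, 2 ≤ d →
    (∀ e, 2 ≤ e → e < d → e * e ≤ n → ¬ e ∣ n) →
    pvAltLoop n d = specialized_eulers_totient n := by
  apply pvAltLoop.induct n
    (motive := fun d => 2 ≤ d → (∀ e, 2 ≤ e → e < d → e * e ≤ n → ¬ e ∣ n) →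
      pvAltLoop n d = specialized_eulers_totient n)
  · -- d*d ≤ n and d divides n: B returns here; d is the least factor of n
    intro d hsq hmod hd2 hbelow
    rw [pvAltLoop]
    simp only [hsq, dite_true, hmod, if_true]
    have hdvd : d ∣ n := (PySem.Int.mod_eq_zero_iff_dvd n d).mp (by simpa using hmod)
    rw [pv_A_eq n d hd2 hdvd hsq]
    intro e he2 hed
    exact hbelow e he2 hed (by nlinarith)
  · -- d*d ≤ n and d does not divide n: step to d+1
    intro d hsq hmod ih hd2 hbelow
    rw [pvAltLoop]
    simp only [hsq, dite_true, hmod]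
    apply ih (by omega)
    intro e he2 hed hesq hedvd
    rcases lt_or_ge e d with h | h
    · exact hbelow e he2 h hesq hedvd
    · have : e = d := by omega
      subst this
      exact hmod ((PySem.Int.mod_eq_zero_iff_dvd n e).mpr hedvd ▸ by simp)
  · -- d*d > n: no factor at all, both sides give 1
    intro d hsq hd2 hbelow
    rw [pvAltLoop]
    simp only [hsq, dite_false]
    symm
    apply pv_A_one
    intro e he2 hen hedvd
    obtain ⟨m, hm⟩ := hedvd
    have hepos : 0 < e := by omega
    have hm2 : 2 ≤ m := by nlinarith
    rcases le_total e m with hle | hle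
    · have hee : e * e ≤ n := by nlinarith
      have hed : e < d := by nlinarith
      exact hbelow e he2 hed hee ⟨m, hm⟩
    · have hmm : m * m ≤ n := by nlinarith
      have hmd : m < d := by nlinarith
      exact hbelow m hm2 hmd hmm ⟨e, by linarith [hm, mul_comm e m]⟩

-- ===== VERDICT (by name: the statement is the Claim_ definition above) =====
theorem specialized_eulers_totient_spec : Claim_equal_specialized_eulers_totient := by
  intro n _
  unfold Spec_specialized_eulers_totient specialized_eulers_totient_alt
  symm
  exact pv_loop_eq n 2 le_rfl (fun e h1 h2 _ => absurd (lt_of_lt_of_le h2 h1) (lt_irrefl e))
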